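-- pv_equiv track=rewrite | github.com/kaungmyathtaywin/CS50 | week6/problems/dna.py | check
-- ===== SOURCE A (Python) =====
-- def check(database, test, tandems):
--     for people in database:
--
--         # Track matching STRs
--         tandem_match = 0
--
--         for tandem in tandems:
--             if int(people[tandem]) == test[tandem]:
--                 tandem_match += 1
--
--         # If all STR counts match, return the name
--         if tandem_match == len(tandems):
--             return people["name"]
--
--     return "No match"
-- ===== SOURCE B (Python) =====
-- def check(database, test, tandems):
--     # Build an index mapping each person's STR signature to their name
--     # (setdefault: first person wins on duplicate signatures), then look
--     # the test signature up once.  A test with a missing STR matches nobody.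
--     index = {}
--     for people in database:
--         signature = tuple(int(people[t]) for t in tandems)
--         index.setdefault(signature, people.get("name"))
--     target = tuple(test.get(t) for t in tandems)
--     return index.get(target, "No match")
-- ===== Notes on version B (the rewrite author's own statement) =====
-- stated objective: alternative
-- what changed: B replaces A's per-person counting loop with a signature index: one pass builds a dict from each person's STR-count tuple to their name (setdefault keeps the first person), then the answer is a single dict lookup of the test's tuple.
import Mathlib
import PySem

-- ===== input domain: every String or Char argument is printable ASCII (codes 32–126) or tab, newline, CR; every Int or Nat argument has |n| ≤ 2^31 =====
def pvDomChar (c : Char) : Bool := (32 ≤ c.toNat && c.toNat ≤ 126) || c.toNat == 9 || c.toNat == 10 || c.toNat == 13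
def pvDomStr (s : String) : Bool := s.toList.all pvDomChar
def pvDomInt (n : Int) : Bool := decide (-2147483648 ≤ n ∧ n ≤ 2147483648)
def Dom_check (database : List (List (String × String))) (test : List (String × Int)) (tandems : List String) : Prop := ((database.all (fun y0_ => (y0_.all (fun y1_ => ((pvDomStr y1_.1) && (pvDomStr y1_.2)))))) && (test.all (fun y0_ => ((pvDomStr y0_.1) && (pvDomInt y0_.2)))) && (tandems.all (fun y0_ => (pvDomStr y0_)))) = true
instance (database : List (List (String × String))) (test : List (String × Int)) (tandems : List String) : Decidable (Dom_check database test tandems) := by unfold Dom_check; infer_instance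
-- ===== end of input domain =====

-- B builds a signature→name index once (first person wins) and answers with one lookup;
-- equivalence of return values is proved on Pre_check, which excludes inputs where the Python raises.

-- ===== PORT A =====
-- int(people[tandem]) == test[tandem]; where Python would raise (missing key / unparseable int)
-- the port yields false — such inputs are excluded by Pre_check.
def strMatch (people : List (String × String)) (test : List (String × Int)) (tandem : String) : Bool :=
  match (people.lookup tandem).bind PySem.Int.ofStr?, test.lookup tandem with
  | some a, some b => a == b
  | _, _ => false

def check (database : List (List (String × String))) (test : List (String × Int)) (tandems : List String) : String :=
  match database with
  | [] => "No match"
  | people :: rest =>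
    let tandem_match : Int :=
      tandems.foldl (fun acc tandem => if strMatch people test tandem then acc + 1 else acc) 0
    if tandem_match = (tandems.length : Int) then (people.lookup "name").getD ""
    else check rest test tandems

-- ===== PORT B =====
-- tuple(int(people[t]) for t in tandems); the int() result is kept as an Option (none = would-raise,
-- excluded by Pre_check)
def sigOf (tandems : List String) (people : List (String × String)) : List (Option Int) :=
  tandems.map (fun t => (people.lookup t).bind PySem.Int.ofStr?)

def check_alt (database : List (List (String × String))) (test : List (String × Int)) (tandems : List String) : String :=
  -- index = setdefault-built dict; target = tuple(test[t] for t in tandems); index.get(target, "No match")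
  (((database.foldl (fun d people => d.setdefault (sigOf tandems people) ((people.lookup "name").getD "")) PySem.Dict.empty : PySem.Dict (List (Option Int)) String)).get?
    (tandems.map (fun t => test.lookup t))).getD "No match"

-- ===== PRECONDITION & SPEC =====
-- Pre_check excludes the shapes on which one of the Pythons raises: a tandem missing from test
-- (KeyError), a person missing a tandem key or holding a non-int value (KeyError/ValueError), or
-- a matching person without a "name" key (all only relevant for a nonempty database). (It
-- requires every person and the test to be well-formed even though A stops scanning at the
-- first match; that mild narrowing keeps the condition closed-form.)
def Pre_check (database : List (List (String × String))) (test : List (String × Int)) (tandems : List String) : Prop :=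
  database = [] ∨
  ((∀ t ∈ tandems, (test.lookup t).isSome) ∧
  ∀ p ∈ database,
    (∀ t ∈ tandems, ((p.lookup t).bind PySem.Int.ofStr?).isSome) ∧
    (tandems.map (fun t => (p.lookup t).bind PySem.Int.ofStr?) = tandems.map (fun t => test.lookup t) →
      (p.lookup "name").isSome))

instance (database : List (List (String × String))) (test : List (String × Int)) (tandems : List String) : Decidable (Pre_check database test tandems) := by unfold Pre_check; infer_instance

def pvWitness_check : (List (List (String × String))) × (List (String × Int)) × List String :=
  ([[("name", "Alice"), ("AGAT", "2")], [("name", "Bob"), ("AGAT", "5")]], [("AGAT", 5)], ["AGAT"])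

def Spec_check (database : List (List (String × String))) (test : List (String × Int)) (tandems : List String) (out : String) : Prop := out = check_alt database test tandems
instance (database : List (List (String × String))) (test : List (String × Int)) (tandems : List String) (out : String) : Decidable (Spec_check database test tandems out) := by unfold Spec_check; infer_instance

-- ===== CLAIM (what is proved, stated in full; the proofs are below) =====
def Claim_equal_check : Prop := ∀ (database : List (List (String × String))) (test : List (String × Int)) (tandems : List String), Dom_check database test tandems → Pre_check database test tandems → Spec_check database test tandems (check database test tandems)

-- ===== LEMMAS AND PROOFS =====

-- A's counter from start acc equals acc + the number of matching tandems.
theorem foldl_count (l : List String) (f : String → Bool) (acc : Int) :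
    l.foldl (fun a t => if f t then a + 1 else a) acc = acc + l.countP f := by
  induction l generalizing acc with
  | nil => simp
  | cons x xs ih =>
    simp only [List.foldl_cons, List.countP_cons, ih]
    by_cases h : f x <;> simp [h] <;> ring

-- the per-person pointwise bridge, under the person's and the test's precondition
theorem strMatch_iff (people : List (String × String)) (test : List (String × Int)) (t : String)
    (hp : ((people.lookup t).bind PySem.Int.ofStr?).isSome) (ht : (test.lookup t).isSome) :
    strMatch people test t = true ↔ (people.lookup t).bind PySem.Int.ofStr? = test.lookup t := by
  obtain ⟨a, ha⟩ := Option.isSome_iff_exists.mp hp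
  obtain ⟨b, hb⟩ := Option.isSome_iff_exists.mp ht
  simp [strMatch, ha, hb]

-- A's "all counts match" test coincides with "the person's signature equals the target"
theorem count_eq_iff_sig (people : List (String × String)) (test : List (String × Int)) (tandems : List String)
    (hp : ∀ t ∈ tandems, ((people.lookup t).bind PySem.Int.ofStr?).isSome)
    (ht : ∀ t ∈ tandems, (test.lookup t).isSome) :
    (tandems.foldl (fun acc tandem => if strMatch people test tandem then acc + 1 else acc) (0 : Int)
      = (tandems.length : Int))
    ↔ sigOf tandems people = tandems.map (fun t => test.lookup t) := by
  rw [foldl_count, zero_add]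
  constructor
  · intro h
    have hcount : tandems.countP (strMatch people test) = tandems.length := by exact_mod_cast h
    have hall := List.countP_eq_length.mp hcount
    simp only [sigOf, List.map_inj_left]
    intro t htm
    exact (strMatch_iff people test t (hp t htm) (ht t htm)).mp (hall t htm)
  · intro h
    have hall : ∀ t ∈ tandems, strMatch people test t = true := by
      simp only [sigOf, List.map_inj_left] at h
      intro t htm
      exact (strMatch_iff people test t (hp t htm) (ht t htm)).mpr (h t htm)
    rw [List.countP_eq_length.mpr hall]

-- lookup in the setdefault-built index = first database entry with matching signature
theorem get?_build (tandems : List String) (db : List (List (String × String)))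
    (d : PySem.Dict (List (Option Int)) String) (k : List (Option Int)) :
    (db.foldl (fun d people => d.setdefault (sigOf tandems people) ((people.lookup "name").getD "")) d).get? k
      = (d.get? k).or ((db.find? (fun p => sigOf tandems p == k)).map (fun p => (p.lookup "name").getD "")) := by
  induction db generalizing d with
  | nil => simp
  | cons p rest ih =>
    simp only [List.foldl_cons, List.find?_cons, ih]
    by_cases h : sigOf tandems p = k
    · subst h
      rw [PySem.Dict.get?_setdefault_self]
      cases d.get? (sigOf tandems p) <;> simp
    · rw [PySem.Dict.get?_setdefault_of_ne d _ (Ne.symm h)]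
      have hb : (sigOf tandems p == k) = false := beq_eq_false_iff_ne.mpr h
      simp [hb]

theorem check_eq_find (database : List (List (String × String))) (test : List (String × Int)) (tandems : List String)
    (ht : ∀ t ∈ tandems, (test.lookup t).isSome)
    (hdb : ∀ p ∈ database, ∀ t ∈ tandems, ((p.lookup t).bind PySem.Int.ofStr?).isSome) :
    check database test tandems
      = ((database.find? (fun p => sigOf tandems p == tandems.map (fun t => test.lookup t))).map
          (fun p => (p.lookup "name").getD "")).getD "No match" := by
  induction database with
  | nil => simp [check]
  | cons p rest ih =>
    have hp := hdb p (by simp)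
    have hrest : ∀ q ∈ rest, ∀ t ∈ tandems, ((q.lookup t).bind PySem.Int.ofStr?).isSome := by
      intro q hq; exact hdb q (by simp [hq])
    rw [check, List.find?_cons]
    by_cases hm : sigOf tandems p = tandems.map (fun t => test.lookup t)
    · have : (tandems.foldl (fun acc tandem => if strMatch p test tandem then acc + 1 else acc) (0 : Int)) = (tandems.length : Int) :=
        (count_eq_iff_sig p test tandems hp ht).mpr hm
      simp [this, hm]
    · have : ¬ (tandems.foldl (fun acc tandem => if strMatch p test tandem then acc + 1 else acc) (0 : Int)) = (tandems.length : Int) := by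
        intro h; exact hm ((count_eq_iff_sig p test tandems hp ht).mp h)
      have hb : (sigOf tandems p == tandems.map (fun t => test.lookup t)) = false := beq_eq_false_iff_ne.mpr hm
      simp only [this, if_false, hb]
      exact ih hrest

-- ===== VERDICT (by name: the statement is the Claim_ definition above) =====
theorem check_spec : Claim_equal_check := by
  intro database test tandems _ hpre
  show check database test tandems = check_alt database test tandems
  rcases hpre with rfl | ⟨ht, hdb⟩
  · simp [check, check_alt]
  unfold check_alt
  rw [get?_build]
  simp only [PySem.Dict.get?_empty, Option.none_or]
  exact check_eq_find database test tandems ht (fun p hp => (hdb p hp).1)
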